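-- pv_equiv track=rewrite | github.com/AYM1104/Wisper-pyannote | app/text_converter.py | srt_to_timestamped_text
-- ===== SOURCE A (Python) =====
-- def srt_to_timestamped_text(srt_content: str) -> str:
--     """
--     SRTファイルをタイムスタンプ付きテキストに変換
--
--     Args:
--         srt_content: SRTファイルの内容
--
--     Returns:
--         タイムスタンプ付きテキスト
--     """
--     lines = srt_content.strip().split('\n')
--     text_lines = []
--
--     i = 0
--     while i < len(lines):
--         line = lines[i].strip()
--
--         # 数字の行（セグメント番号）をスキップ
--         if line.isdigit():
--             i += 1
--             continue
--
--         # 時間行を処理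
--         if '-->' in line:
--             time_line = line
--             i += 1
--             # 次の行がテキスト
--             if i < len(lines):
--                 text_line = lines[i].strip()
--                 if text_line:
--                     text_lines.append(f"[{time_line}] {text_line}")
--             i += 1
--             continue
--
--         # 空行をスキップ
--         if not line:
--             i += 1
--             continue
--
--         i += 1
--
--     return '\n'.join(text_lines)
-- ===== SOURCE B (Python) =====
-- def srt_to_timestamped_text(srt_content: str) -> str:
--     """Single forward pass with a carried pending-time state instead of index lookahead."""
--     text_lines = []
--     pending_time = None
--     for raw in srt_content.strip().split('\n'):
--         s = raw.strip()
--         if pending_time is not None: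
--             if s:
--                 text_lines.append(f"[{pending_time}] {s}")
--             pending_time = None
--         elif '-->' in s:
--             pending_time = s
--     return '\n'.join(text_lines)
-- ===== Notes on version B (the rewrite author's own statement) =====
-- stated objective: simpler
-- what changed: Replaced A's while-loop with manual index arithmetic and lookahead (i, lines[i], consuming lines[i+1] after a time line) by a single for-loop over the lines carrying a pending_time state that emits on the next line.
import Mathlib
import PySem

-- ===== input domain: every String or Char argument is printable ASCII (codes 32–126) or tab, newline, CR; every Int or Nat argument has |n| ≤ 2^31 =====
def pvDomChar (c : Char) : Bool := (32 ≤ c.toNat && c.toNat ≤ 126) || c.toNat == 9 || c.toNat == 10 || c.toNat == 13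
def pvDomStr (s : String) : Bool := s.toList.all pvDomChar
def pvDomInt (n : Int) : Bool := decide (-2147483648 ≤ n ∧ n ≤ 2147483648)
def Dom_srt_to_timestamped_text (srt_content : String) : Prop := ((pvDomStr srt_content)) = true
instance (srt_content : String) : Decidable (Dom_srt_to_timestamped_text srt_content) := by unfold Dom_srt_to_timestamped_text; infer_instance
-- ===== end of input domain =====

-- B replaces A's while-loop with manual index lookahead by a single pass carrying a pending-time state (objective: simpler).

-- ===== PORT A =====
-- A's while loop over `lines` with index i; i only advances, so it is the obvious
-- recursion over the remaining lines, with the time-line branch consuming the next line.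
def pvALoop : List String → List String → List String
  | [], acc => acc
  | l :: rest, acc =>
    let line := PySem.Str.strip l
    if PySem.Str.strIsdigit line then pvALoop rest acc
    else if PySem.Str.isIn "-->" line then
      match rest with
      | [] => acc
      | t :: rest' =>
        let text_line := PySem.Str.strip t
        pvALoop rest' (if text_line ≠ "" then acc ++ ["[" ++ line ++ "] " ++ text_line] else acc)
    else if line = "" then pvALoop rest acc
    else pvALoop rest acc

def srt_to_timestamped_text (srt_content : String) : String :=
  let lines := (PySem.Str.split? (PySem.Str.strip srt_content) "\n").getD []  -- split? is some since sep ≠ ""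
  PySem.Str.join "\n" (pvALoop lines [])

-- ===== PORT B =====
def pvBStep (st : Option String × List String) (raw : String) : Option String × List String :=
  let s := PySem.Str.strip raw
  match st.1 with
  | some t => (none, if s ≠ "" then st.2 ++ ["[" ++ t ++ "] " ++ s] else st.2)
  | none => if PySem.Str.isIn "-->" s then (some s, st.2) else (none, st.2)

def srt_to_timestamped_text_alt (srt_content : String) : String :=
  let lines := (PySem.Str.split? (PySem.Str.strip srt_content) "\n").getD []  -- split? is some since sep ≠ ""
  PySem.Str.join "\n" ((lines.foldl pvBStep (none, [])).2)

-- ===== PRECONDITION & SPEC =====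
def Spec_srt_to_timestamped_text (srt_content : String) (out : String) : Prop := out = srt_to_timestamped_text_alt srt_content
instance (srt_content : String) (out : String) : Decidable (Spec_srt_to_timestamped_text srt_content out) := by unfold Spec_srt_to_timestamped_text; infer_instance

-- ===== CLAIM (what is proved, stated in full; the proofs are below) =====
def Claim_equal_srt_to_timestamped_text : Prop := ∀ (srt_content : String), Dom_srt_to_timestamped_text srt_content → Spec_srt_to_timestamped_text srt_content (srt_to_timestamped_text srt_content)

-- ===== LEMMAS AND PROOFS =====

-- An all-digits nonempty line cannot contain '-->'.
lemma pv_digit_no_arrow (s : String) (h : PySem.Str.strIsdigit s = true) :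
    PySem.Str.isIn "-->" s = false := by
  rw [PySem.Str.strIsdigit_eq, PySem.Chars.strIsdigit, Bool.and_eq_true] at h
  obtain ⟨-, hall⟩ := h
  rw [PySem.Str.isIn_eq]
  by_contra hc
  rw [Bool.not_eq_false, PySem.Chars.isIn_iff_infix] at hc
  have hmem : '-' ∈ s.toList := hc.mem (by decide)
  have := List.all_eq_true.mp hall '-' hmem
  simp [PySem.Chars.isdigit] at this

-- A's index loop equals B's one-pass fold, for any accumulator.
lemma pv_loop_eq (ls : List String) (acc : List String) :
    pvALoop ls acc = (ls.foldl pvBStep (none, acc)).2 := by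
  match ls with
  | [] => simp [pvALoop]
  | l :: rest =>
    rw [pvALoop.eq_def]
    by_cases hdig : PySem.Str.strIsdigit (PySem.Str.strip l) = true
    · simp only [List.foldl_cons, pvBStep, hdig, if_true,
        pv_digit_no_arrow _ hdig, Bool.false_eq_true, if_false]
      exact pv_loop_eq rest acc
    · by_cases harr : PySem.Str.isIn "-->" (PySem.Str.strip l) = true
      · match rest with
        | [] =>
          simp only [List.foldl_cons, List.foldl_nil, pvBStep, hdig,
            Bool.false_eq_true, if_false, harr, if_true]
        | t :: rest' =>
          simp only [List.foldl_cons, pvBStep, hdig,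
            Bool.false_eq_true, if_false, harr, if_true]
          exact pv_loop_eq rest' _
      · by_cases hempty : PySem.Str.strip l = ""
        · simp only [List.foldl_cons, pvBStep, hempty, if_true]
          exact pv_loop_eq rest acc
        · simp only [List.foldl_cons, pvBStep, hdig, harr, hempty]
          exact pv_loop_eq rest acc
termination_by ls.length
decreasing_by all_goals simp

-- ===== VERDICT (by name: the statement is the Claim_ definition above) =====
theorem srt_to_timestamped_text_spec : Claim_equal_srt_to_timestamped_text := by
  intro s _
  unfold Spec_srt_to_timestamped_text srt_to_timestamped_text srt_to_timestamped_text_alt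
  simp [pv_loop_eq]
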